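-- pv_equiv track=rewrite | github.com/pat-tyrone/advent_of_code | 2023/day_10.py | first_cxns
-- ===== SOURCE A (Python) =====
-- def define_s(map_lol):
--     s = {}
--     found_s = False
--     for r_i, r in enumerate(map_lol):
--         if found_s:
--             break
--         for c_i, c in enumerate(r):
--             if c=='S':
--                 s['coords'] = (r_i, c_i)
--                 found_s = True
--                 break
--
--     possible_s_shapes = ['|', '-', 'L', 'J', '7', 'F']
--     impossible_s_shapes = []
--
--     try:
--         left = map_lol[s['coords'][0]][s['coords'][1] - 1]
--         if left not in ['-', 'L', 'F']:
--             impossible_s_shapes.extend(['-', 'J', '7'])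
--     except:
--         impossible_s_shapes.extend(['-', 'J', '7'])
--
--     try:
--         right = map_lol[s['coords'][0]][s['coords'][1] + 1]
--         if right not in ['-', '7', 'J']:
--             impossible_s_shapes.extend(['-', 'L', 'F'])
--     except:
--         impossible_s_shapes.extend(['-', 'L', 'F'])
--
--     try:
--         above = map_lol[s['coords'][0] - 1][s['coords'][1]]
--         if above not in ['|', '7', 'F']:
--             impossible_s_shapes.extend(['|', 'L', 'J'])
--     except:
--         impossible_s_shapes.extend(['|', 'L', 'J'])
--
--     try:
--         below = map_lol[s['coords'][0] + 1][s['coords'][1]]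
--         if below not in ['|', 'L', 'J']:
--             impossible_s_shapes.extend(['|', '7', 'F'])
--     except:
--         impossible_s_shapes.extend(['|', '7', 'F'])
--
--     for shape in set(impossible_s_shapes):
--         possible_s_shapes.remove(shape)
--
--     assert len(possible_s_shapes) == 1
--
--     s['shape'] = possible_s_shapes[0]
--
--     return s
--
-- def first_cxns(map_lol):
--     s_dict = define_s(map_lol)
--     coord_val = s_dict['shape']
--     r = s_dict['coords'][0]
--     c = s_dict['coords'][1]
--
--     neigbs = {
--         '|': ((1,0),(-1,0)),
--         '-': ((0,-1),(0,1)),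
--         'L': ((-1,0),(0,1)),
--         'J': ((-1,0),(0,-1)),
--         '7': ((0,-1),(1,0)),
--         'F': ((0,1),(1,0))
--     }
--
--     # Relative Coordinates of connections (cxsns)
--     rel_coords = neigbs[coord_val]
--
--     cxns = [(r + rc[0], c + rc[1]) for rc in rel_coords]
--
--     return cxns
-- ===== SOURCE B (Python) =====
-- def first_cxns(map_lol):
--     # Find S: first row containing an 'S' cell, then its column.
--     r = next(i for i, row in enumerate(map_lol) if 'S' in row)
--     c = map_lol[r].index('S')
--
--     neigbs = {
--         '|': ((1, 0), (-1, 0)),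
--         '-': ((0, -1), (0, 1)),
--         'L': ((-1, 0), (0, 1)),
--         'J': ((-1, 0), (0, -1)),
--         '7': ((0, -1), (1, 0)),
--         'F': ((0, 1), (1, 0)),
--     }
--     # For each direction from S, the neighbor shapes that open back toward S.
--     opens_toward = {
--         (0, -1): ['-', 'L', 'F'],
--         (0, 1): ['-', '7', 'J'],
--         (-1, 0): ['|', '7', 'F'],
--         (1, 0): ['|', 'L', 'J'],
--     }
--
--     connected = set()
--     for d, accepted in opens_toward.items():
--         try:
--             if map_lol[r + d[0]][c + d[1]] in accepted:
--                 connected.add(d)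
--         except IndexError:
--             pass
--
--     matches = [shape for shape, dirs in neigbs.items() if set(dirs) == connected]
--     assert len(matches) == 1
--     shape = matches[0]
--     return [(r + dr, c + dc) for dr, dc in neigbs[shape]]
-- ===== Notes on version B (the rewrite author's own statement) =====
-- stated objective: alternative
-- what changed: A starts from all six pipe shapes and eliminates those made impossible by each of the four neighbours; B instead collects the set of directions that actually connect to S and selects the unique shape whose pair of opening directions equals that set (S-finding is a findIdx/index composition rather than a flag-and-break nested loop).
import Mathlib
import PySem

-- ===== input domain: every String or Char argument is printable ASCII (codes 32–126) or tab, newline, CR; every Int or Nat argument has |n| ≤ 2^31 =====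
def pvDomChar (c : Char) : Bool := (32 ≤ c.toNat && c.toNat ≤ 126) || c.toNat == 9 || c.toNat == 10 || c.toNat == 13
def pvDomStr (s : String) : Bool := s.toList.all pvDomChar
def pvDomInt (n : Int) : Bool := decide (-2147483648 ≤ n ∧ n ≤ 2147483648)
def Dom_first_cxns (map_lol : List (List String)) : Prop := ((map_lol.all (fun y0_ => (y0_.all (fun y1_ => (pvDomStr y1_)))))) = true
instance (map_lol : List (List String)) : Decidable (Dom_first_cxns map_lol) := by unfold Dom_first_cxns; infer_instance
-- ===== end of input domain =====

-- B replaces A's "start with all six shapes and eliminate the impossible ones" by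
-- "collect the set of connected directions and pick the unique shape whose openings equal it";
-- objective: alternative decomposition (same cost). Equal on Pre_ (where Python A returns).

-- the neigbs dict, shared verbatim by both Pythons
def pvNeigbs : PySem.Dict String ((Int × Int) × (Int × Int)) :=
  PySem.Dict.ofList [("|", ((1,0),(-1,0))), ("-", ((0,-1),(0,1))), ("L", ((-1,0),(0,1))),
                     ("J", ((-1,0),(0,-1))), ("7", ((0,-1),(1,0))), ("F", ((0,1),(1,0)))]

-- the final line of both Pythons: [(r + dr, c + dc) for dr, dc in neigbs[shape]]
def pvCxns (ri ci : Int) (shape : String) : List (Int × Int) :=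
  match PySem.Dict.get? pvNeigbs shape with
  | some rel => [(ri + rel.1.1, ci + rel.1.2), (ri + rel.2.1, ci + rel.2.2)]
  | none => []   -- unreachable: shape is always a key of neigbs

-- ===== PORT A =====
-- inner loop of define_s: first index of 'S' in a row
def pvA_rowS : List String → Nat → Option Nat
  | [], _ => none
  | c :: rest, i => if c = "S" then some i else pvA_rowS rest (i + 1)

-- outer loop of define_s with the found_s flag/break
def pvA_findS : List (List String) → Nat → Option (Nat × Nat)
  | [], _ => none
  | row :: rest, r =>
    match pvA_rowS row 0 with
    | some c => some (r, c)
    | none => pvA_findS rest (r + 1)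

-- one try-block of define_s: extend impossible by `bad` unless the neighbour exists and is in `accepted`
def pvA_imp (o : Option String) (accepted bad : List String) : List String :=
  match o with
  | some v => if accepted.contains v then [] else bad
  | none => bad

def first_cxns (map_lol : List (List String)) : List (Int × Int) :=
  match pvA_findS map_lol 0 with
  | none => []   -- Python: s['coords'] raises in every try, possible ends empty, assert raises
  | some (r, c) =>
    let ri : Int := r
    let ci : Int := c
    let impossible : List String :=
      pvA_imp ((PySem.List.pyGet? map_lol ri).bind (fun row => PySem.List.pyGet? row (ci - 1)))
        ["-", "L", "F"] ["-", "J", "7"] ++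
      pvA_imp ((PySem.List.pyGet? map_lol ri).bind (fun row => PySem.List.pyGet? row (ci + 1)))
        ["-", "7", "J"] ["-", "L", "F"] ++
      pvA_imp ((PySem.List.pyGet? map_lol (ri - 1)).bind (fun row => PySem.List.pyGet? row ci))
        ["|", "7", "F"] ["|", "L", "J"] ++
      pvA_imp ((PySem.List.pyGet? map_lol (ri + 1)).bind (fun row => PySem.List.pyGet? row ci))
        ["|", "L", "J"] ["|", "7", "F"]
    -- for shape in set(impossible): possible.remove(shape)  (result independent of set order)
    let possible : List String :=
      (PySem.Set.ofList impossible).foldl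
        (fun acc s => (PySem.List.remove? acc s).getD acc) ["|", "-", "L", "J", "7", "F"]
    match possible with
    | [shape] => pvCxns ri ci shape
    | _ => []   -- Python: assert len(possible_s_shapes) == 1 raises

-- ===== PORT B =====
-- first row containing 'S', then column of 'S' in it
def pvB_findS (map_lol : List (List String)) : Option (Nat × Nat) :=
  match map_lol.findIdx? (fun row => row.contains "S") with
  | none => none   -- Python: next(...) raises StopIteration
  | some r =>
    match map_lol[r]? with
    | some row =>
      match PySem.List.index? row "S" with
      | some c => some (r, c)
      | none => none   -- unreachable: row contains "S"
    | none => none   -- unreachable: r < length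

-- the opens_toward dict: direction ↦ neighbour shapes that open back toward S
def pvOpens : List ((Int × Int) × List String) :=
  [((0, -1), ["-", "L", "F"]), ((0, 1), ["-", "7", "J"]),
   ((-1, 0), ["|", "7", "F"]), ((1, 0), ["|", "L", "J"])]

-- body of one loop iteration: does the neighbour cell exist and open toward S?
def pvB_conn (o : Option String) (accepted : List String) : Bool :=
  match o with
  | some v => accepted.contains v
  | none => false   -- except IndexError: pass

def first_cxns_alt (map_lol : List (List String)) : List (Int × Int) :=
  (pvB_findS map_lol).elim ([])   -- none: Python raises; outside Pre_
   (fun rc =>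
    let ri : Int := rc.1
    let ci : Int := rc.2
    let connected : PySem.Set (Int × Int) :=
      pvOpens.foldl
        (fun acc p =>
          if pvB_conn ((PySem.List.pyGet? map_lol (ri + p.1.1)).bind
                        (fun row => PySem.List.pyGet? row (ci + p.1.2))) p.2
          then PySem.Set.add acc p.1 else acc)
        PySem.Set.empty
    let matchList : List String :=
      [("|", ((1,0),(-1,0))), ("-", ((0,-1),(0,1))), ("L", ((-1,0),(0,1))),
       ("J", ((-1,0),(0,-1))), ("7", ((0,-1),(1,0))), ("F", ((0,1),(1,0)))].foldl
        (fun acc q =>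
          if PySem.Set.equal (PySem.Set.ofList [q.2.1, q.2.2]) connected
          then acc ++ [q.1] else acc) []
    if matchList.length = 1 then   -- assert len(matches) == 1
      match matchList with
      | shape :: _ => pvCxns ri ci shape   -- shape = matches[0]
      | [] => []   -- unreachable: the length is 1
    else [])   -- Python: the assert raises

-- ===== PRECONDITION & SPEC =====
-- exactly the inputs where the Python A returns normally: an 'S' cell exists and exactly two
-- of the four neighbour directions connect to it, so the shape elimination leaves one shape
-- (otherwise A raises AssertionError).
def pvPreCheck (map_lol : List (List String)) : Bool :=
  match pvB_findS map_lol with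
  | none => false
  | some (r, c) =>
    (pvOpens.countP
      (fun p => pvB_conn ((PySem.List.pyGet? map_lol ((r : Int) + p.1.1)).bind
                           (fun row => PySem.List.pyGet? row ((c : Int) + p.1.2))) p.2)) = 2

def Pre_first_cxns (map_lol : List (List String)) : Prop := pvPreCheck map_lol = true
instance (map_lol : List (List String)) : Decidable (Pre_first_cxns map_lol) := by
  unfold Pre_first_cxns; infer_instance

def pvWitness_first_cxns : List (List String) :=
  [[".", ".", "."], [".", "S", "-"], [".", "|", "."]]

def Spec_first_cxns (map_lol : List (List String)) (out : List (Int × Int)) : Prop := out = first_cxns_alt map_lol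
instance (map_lol : List (List String)) (out : List (Int × Int)) : Decidable (Spec_first_cxns map_lol out) := by unfold Spec_first_cxns; infer_instance

-- ===== CLAIM (what is proved, stated in full; the proofs are below) =====
def Claim_equal_first_cxns : Prop := ∀ (map_lol : List (List String)), Dom_first_cxns map_lol → Pre_first_cxns map_lol → Spec_first_cxns map_lol (first_cxns map_lol)

-- ===== LEMMAS AND PROOFS =====

lemma pvA_rowS_eq (row : List String) : ∀ k, pvA_rowS row k = (PySem.List.index? row "S").map (· + k) := by
  induction row with
  | nil => intro k; rfl
  | cons x rest ih =>
    intro k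
    rw [PySem.List.index?_eq_idxOf?] at *
    by_cases hx : x = "S"
    · subst hx; simp [pvA_rowS, List.idxOf?, List.findIdx?_cons]
    · have hb : (x == "S") = false := by simp [hx]
      simp only [pvA_rowS, if_neg hx, List.idxOf?, List.findIdx?_cons, hb, Bool.false_eq_true,
        if_false, Option.map_map]
      rw [ih (k + 1)]
      simp only [List.idxOf?] at *
      cases List.findIdx? (· == "S") rest with
      | none => simp
      | some v => simp; omega

lemma pvB_findS_cons (row : List String) (rest : List (List String))
    (h : row.contains "S" = false) :
    pvB_findS (row :: rest) = (pvB_findS rest).map (fun rc => (rc.1 + 1, rc.2)) := by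
  simp only [pvB_findS, List.findIdx?_cons, h, Bool.false_eq_true, if_false]
  cases rest.findIdx? (fun r => r.contains "S") with
  | none => rfl
  | some r =>
    simp only [Option.map_some, List.getElem?_cons_succ]
    cases (rest[r]? : Option (List String)) with
    | none => rfl
    | some rw =>
      cases hix : PySem.List.index? rw "S" <;> simp only [hix] <;> rfl

lemma pvFindS_shift (m : List (List String)) :
    ∀ k, pvA_findS m k = (pvB_findS m).map (fun rc => (rc.1 + k, rc.2)) := by
  induction m with
  | nil => intro k; rfl
  | cons row rest ih =>
    intro k
    by_cases hc : row.contains "S"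
    · have hidx : ∃ c, PySem.List.index? row "S" = some c := by
        have := (PySem.List.index?_isSome_iff (xs := row) (v := "S")).mpr
          (by simpa using hc)
        exact Option.isSome_iff_exists.mp this
      obtain ⟨c, hcix⟩ := hidx
      have hrow : pvA_rowS row 0 = some c := by
        rw [pvA_rowS_eq row 0, hcix]; rfl
      have hmem : "S" ∈ row := by simpa using hc
      have hcix' : List.idxOf? "S" row = some c := by
        simpa [PySem.List.index?_eq_idxOf?] using hcix
      simp [pvA_findS, hrow, pvB_findS, List.findIdx?_cons, hmem, hcix']
    · have hb : row.contains "S" = false := by simpa using hc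
      have hrow : pvA_rowS row 0 = none := by
        rw [pvA_rowS_eq row 0]
        have : PySem.List.index? row "S" = none := by
          rw [PySem.List.index?_eq_none_iff]
          simpa using hb
        rw [this]; rfl
      simp only [pvA_findS, hrow, pvB_findS_cons row rest hb, ih (k + 1), Option.map_map]
      cases pvB_findS rest with
      | none => rfl
      | some rc => simp; omega

lemma pvFindS_eq (m : List (List String)) : pvA_findS m 0 = pvB_findS m := by
  rw [pvFindS_shift m 0]
  cases pvB_findS m <;> simp

lemma pvImp_eq (o : Option String) (accepted bad : List String) :
    pvA_imp o accepted bad = if pvB_conn o accepted then [] else bad := by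
  cases o <;> simp [pvA_imp, pvB_conn]

-- ===== VERDICT (by name: the statement is the Claim_ definition above) =====
theorem first_cxns_spec : Claim_equal_first_cxns := by
  intro m _ _
  unfold Spec_first_cxns first_cxns first_cxns_alt
  rw [pvFindS_eq]
  cases h : pvB_findS m with
  | none => rfl
  | some rc =>
    obtain ⟨r, c⟩ := rc
    simp only [Option.elim, pvOpens, List.foldl, pvImp_eq, add_zero, ← sub_eq_add_neg]
    generalize (pvB_conn ((PySem.List.pyGet? m (r : Int)).bind
      fun row => PySem.List.pyGet? row ((c : Int) - 1)) ["-", "L", "F"]) = bL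
    generalize (pvB_conn ((PySem.List.pyGet? m (r : Int)).bind
      fun row => PySem.List.pyGet? row ((c : Int) + 1)) ["-", "7", "J"]) = bR
    generalize (pvB_conn ((PySem.List.pyGet? m ((r : Int) - 1)).bind
      fun row => PySem.List.pyGet? row (c : Int)) ["|", "7", "F"]) = bU
    generalize (pvB_conn ((PySem.List.pyGet? m ((r : Int) + 1)).bind
      fun row => PySem.List.pyGet? row (c : Int)) ["|", "L", "J"]) = bD
    cases bL <;> cases bR <;> cases bU <;> cases bD <;> rfl
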